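-- pv_equiv track=rewrite | github.com/TomPham204/Yggdrasil-CB-Tools | ocr.py | getMostMatched
-- ===== SOURCE A (Python) =====
-- import copy
--
-- def getMostMatched(name1, length, pickedFrom):
--    mostMatchedName='0'
--    highestMatchCount=4
--
--    if(length<5):
--       highestMatchCount=2
--    else:
--       highestMatchCount=4
--
--    for name2 in pickedFrom:
--       matchCount=0
--       startingPoint2=0
--       startingPoint1=0
--       for i in range(startingPoint2, len(name2)):
--          for j in range(startingPoint1, len(name1)):
--             if(name1[j]==name2[i]):
--                startingPoint2=i+1
--                startingPoint1=j+1
--                matchCount+=1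
--                break
--       if(matchCount > highestMatchCount):
--          mostMatchedName=copy.deepcopy(name2)
--          highestMatchCount=copy.deepcopy(matchCount)
--
--    return mostMatchedName
-- ===== SOURCE B (Python) =====
-- def getMostMatched(name1, length, pickedFrom):
--     best = '0'
--     bestCount = 2 if length < 5 else 4
--     # index: char -> sorted list of its positions in name1
--     pos = {}
--     for j, ch in enumerate(name1):
--         pos.setdefault(ch, []).append(j)
--     for name2 in pickedFrom:
--         p = 0
--         count = 0
--         for ch in name2:
--             ps = pos.get(ch)
--             if ps is None:
--                 continue
--             # bisect_left(ps, p), hand-written (A imports no bisect)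
--             lo, hi = 0, len(ps)
--             while lo < hi:
--                 mid = (lo + hi) // 2
--                 if ps[mid] < p:
--                     lo = mid + 1
--                 else:
--                     hi = mid
--             if lo < len(ps):
--                 p = ps[lo] + 1
--                 count += 1
--         if count > bestCount:
--             best = name2
--             bestCount = count
--     return best
-- ===== Notes on version B (the rewrite author's own statement) =====
-- stated objective: faster
-- what changed: Replaces the per-candidate rescan of name1 (inner linear scan of name1 for every character of every candidate) by a one-time char->positions index of name1 with a binary search for the next match position per candidate character.
import Mathlib
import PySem

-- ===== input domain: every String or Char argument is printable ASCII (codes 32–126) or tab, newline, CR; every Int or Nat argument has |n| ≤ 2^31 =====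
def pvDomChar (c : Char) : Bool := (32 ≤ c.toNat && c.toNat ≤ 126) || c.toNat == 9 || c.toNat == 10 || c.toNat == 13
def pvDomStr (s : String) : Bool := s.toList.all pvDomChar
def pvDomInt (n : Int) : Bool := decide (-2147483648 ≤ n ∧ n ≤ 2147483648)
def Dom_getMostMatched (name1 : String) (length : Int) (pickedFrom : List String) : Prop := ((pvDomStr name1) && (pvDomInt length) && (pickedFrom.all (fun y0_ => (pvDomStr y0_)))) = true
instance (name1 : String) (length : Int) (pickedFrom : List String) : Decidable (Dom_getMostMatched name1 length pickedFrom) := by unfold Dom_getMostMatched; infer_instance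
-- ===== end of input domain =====

-- B replaces A's per-candidate rescans of name1 by a one-time char->positions index of
-- name1 plus a binary search per candidate character (objective: faster).

-- ===== PORT A =====
-- inner loop: for j in range(sp1, len(name1)): if name1[j]==c: ...; break  — returns the j it breaks at
def aFind (n1 : List Char) (c : Char) (j : Nat) : Option Nat :=
  if h : j < n1.length then
    if n1[j] = c then some j else aFind n1 c (j + 1)
  else none
termination_by n1.length - j

-- middle loop over i = range(0, len(name2)) with state (matchCount, startingPoint2, startingPoint1)
def aScan (n1 n2 : List Char) (i : Nat) (mc : Int) (sp2 sp1 : Nat) : Int :=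
  if h : i < n2.length then
    match aFind n1 n2[i] sp1 with
    | some j => aScan n1 n2 (i + 1) (mc + 1) (i + 1) (j + 1)
    | none => aScan n1 n2 (i + 1) mc sp2 sp1
  else mc
termination_by n2.length - i

def getMostMatched (name1 : String) (length : Int) (pickedFrom : List String) : String :=
  let highestMatchCount : Int := 4
  let highestMatchCount : Int := if length < 5 then 2 else highestMatchCount
  (pickedFrom.foldl
    (fun (st : String × Int) name2 =>
      let matchCount := aScan name1.toList name2.toList 0 0 0 0
      if matchCount > st.2 then (name2, matchCount) else st)
    ("0", highestMatchCount)).1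

-- ===== PORT B =====
-- pos = {}; for j, ch in enumerate(name1): pos.setdefault(ch, []).append(j)
def buildPos (n1 : List Char) : PySem.Dict Char (List Int) :=
  ((PySem.List.enumerate n1).map (fun p => (p.2, p.1))).foldl
    (fun d p => d.modify p.1 [] (· ++ [p.2])) PySem.Dict.empty

-- per-candidate loop: for ch in name2: ps = pos.get(ch); bisect_left(ps, p); …
-- the hand-written lo/hi bisect_left loop in Source B is exactly PySem.List.bisectLeft's loop
def bCount (pos : PySem.Dict Char (List Int)) (cs : List Char) (p : Int) (count : Int) : Int :=
  match cs with
  | [] => count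
  | c :: rest =>
    match pos.get? c with
    | none => bCount pos rest p count
    | some ps =>
      let lo := PySem.List.bisectLeft ps p
      if h : lo < ps.length then bCount pos rest (ps[lo] + 1) (count + 1)
      else bCount pos rest p count

def getMostMatched_alt (name1 : String) (length : Int) (pickedFrom : List String) : String :=
  let bestCount : Int := if length < 5 then 2 else 4
  let pos := buildPos name1.toList
  (pickedFrom.foldl
    (fun (st : String × Int) name2 =>
      let count := bCount pos name2.toList 0 0
      if count > st.2 then (name2, count) else st)
    ("0", bestCount)).1

-- ===== PRECONDITION & SPEC =====
def Spec_getMostMatched (name1 : String) (length : Int) (pickedFrom : List String) (out : String) : Prop := out = getMostMatched_alt name1 length pickedFrom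
instance (name1 : String) (length : Int) (pickedFrom : List String) (out : String) : Decidable (Spec_getMostMatched name1 length pickedFrom out) := by unfold Spec_getMostMatched; infer_instance

-- ===== CLAIM (what is proved, stated in full; the proofs are below) =====
def Claim_equal_getMostMatched : Prop := ∀ (name1 : String) (length : Int) (pickedFrom : List String), Dom_getMostMatched name1 length pickedFrom → Spec_getMostMatched name1 length pickedFrom (getMostMatched name1 length pickedFrom)

-- ===== LEMMAS AND PROOFS =====

-- list of positions (as Ints) of c in n1, offset by k
def posL (n1 : List Char) (c : Char) (k : Nat) : List Int :=
  match n1 with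
  | [] => []
  | a :: t => if a = c then (k : Int) :: posL t c (k + 1) else posL t c (k + 1)

theorem filt_enum (n1 : List Char) (c : Char) (k : Nat) :
    ((((PySem.List.enumerate n1 (k : Int)).map (fun p => (p.2, p.1))).filter (fun p => p.1 == c)).map (·.2)) = posL n1 c k := by
  induction n1 generalizing k with
  | nil => simp [PySem.List.enumerate, posL]
  | cons a t ih =>
    have hc : ((k : Int) + 1) = ((k + 1 : Nat) : Int) := by push_cast; ring
    simp only [PySem.List.enumerate, List.map_cons, List.filter_cons, posL, hc]
    by_cases h : a = c
    · simp [h]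
      rw [hc]
      exact ih (k+1)
    · simp [h]
      rw [hc]
      exact ih (k+1)

theorem getD_buildPos (n1 : List Char) (c : Char) :
    (buildPos n1).getD c [] = posL n1 c 0 := by
  unfold buildPos
  rw [PySem.Dict.getD_foldl_modify_append]
  simpa using filt_enum n1 c 0

theorem mem_posL (n1 : List Char) (c : Char) (k : Nat) (x : Int) :
    x ∈ posL n1 c k ↔ ∃ j : Nat, ∃ h : j < n1.length, n1[j] = c ∧ x = ((k + j : Nat) : Int) := by
  induction n1 generalizing k with
  | nil => simp [posL]
  | cons a t ih =>
    constructor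
    · intro hx
      unfold posL at hx
      by_cases h : a = c
      · simp [h] at hx
        rcases hx with rfl | hx
        · exact ⟨0, by simp, by simpa using h⟩
        · rcases (ih (k+1)).1 hx with ⟨j, hj, hc, rfl⟩
          exact ⟨j+1, by simpa using Nat.succ_lt_succ hj, by simpa using hc, by push_cast; ring⟩
      · simp [h] at hx
        rcases (ih (k+1)).1 hx with ⟨j, hj, hc, rfl⟩
        exact ⟨j+1, by simpa using Nat.succ_lt_succ hj, by simpa using hc, by push_cast; ring⟩
    · rintro ⟨j, hj, hc, rfl⟩
      unfold posL
      match j with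
      | 0 =>
        simp at hc
        simp [hc]
      | j+1 =>
        simp at hc hj
        have hxe : ((k + (j+1) : Nat) : Int) = (((k+1) + j : Nat) : Int) := by push_cast; ring
        have hmem := (ih (k+1)).2 ⟨j, hj, hc, hxe⟩
        push_cast at hmem
        by_cases h : a = c
        · simp [h]
          right; exact hmem
        · simp [h]
          exact hmem

theorem posL_lb (n1 : List Char) (c : Char) (k : Nat) :
    ∀ x ∈ posL n1 c k, (k : Int) ≤ x := by
  intro x hx
  rcases (mem_posL n1 c k x).1 hx with ⟨j, hj, hc, rfl⟩
  push_cast; omega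

theorem posL_sorted (n1 : List Char) (c : Char) (k : Nat) :
    List.Pairwise (· ≤ ·) (posL n1 c k) := by
  induction n1 generalizing k with
  | nil => simp [posL]
  | cons a t ih =>
    unfold posL
    by_cases h : a = c
    · simp only [h, if_true]
      refine List.pairwise_cons.2 ⟨fun x hx => ?_, ih (k+1)⟩
      have := posL_lb t c (k+1) x hx
      push_cast at this ⊢; omega
    · simpa [h] using ih (k+1)

theorem aFind_none (n1 : List Char) (c : Char) (p : Nat) (hn : aFind n1 c p = none) :
    ∀ j, p ≤ j → ∀ h : j < n1.length, n1[j] ≠ c := by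
  intro j hpj h hc
  induction hd : n1.length - p generalizing p with
  | zero => omega
  | succ m ih =>
    unfold aFind at hn
    rw [dif_pos (by omega : p < n1.length)] at hn
    by_cases he : n1[p] = c
    · rw [if_pos he] at hn; exact Option.some_ne_none _ hn
    · rw [if_neg he] at hn
      rcases Nat.eq_or_lt_of_le hpj with rfl | hlt
      · exact he hc
      · exact ih (p+1) hn hlt (by omega)

theorem aFind_some (n1 : List Char) (c : Char) (p j : Nat) (hs : aFind n1 c p = some j) :
    p ≤ j ∧ ∃ h : j < n1.length, n1[j] = c ∧
      ∀ i, p ≤ i → ∀ hi : i < n1.length, n1[i] = c → j ≤ i := by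
  induction hd : n1.length - p generalizing p with
  | zero =>
    unfold aFind at hs
    rw [dif_neg (by omega)] at hs
    simp at hs
  | succ m ih =>
    have hp : p < n1.length := by omega
    unfold aFind at hs
    rw [dif_pos hp] at hs
    by_cases he : n1[p] = c
    · rw [if_pos he] at hs
      obtain rfl : p = j := Option.some.inj hs
      exact ⟨le_refl _, hp, he, fun i hpi _ _ => hpi⟩
    · rw [if_neg he] at hs
      obtain ⟨h1, h2, h3, h4⟩ := ih (p+1) hs (by omega)
      refine ⟨by omega, h2, h3, fun i hpi hi hc => ?_⟩
      rcases Nat.eq_or_lt_of_le hpi with rfl | hlt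
      · exact absurd hc he
      · exact h4 i hlt hi hc

theorem mem_posL_zero (n1 : List Char) (c : Char) (x : Int) :
    x ∈ posL n1 c 0 ↔ ∃ j : Nat, ∃ h : j < n1.length, n1[j] = c ∧ x = (j : Int) := by
  rw [mem_posL]
  constructor
  · rintro ⟨j, hj, hc, rfl⟩; exact ⟨j, hj, hc, by push_cast; ring⟩
  · rintro ⟨j, hj, hc, rfl⟩; exact ⟨j, hj, hc, by push_cast; ring⟩

-- key bridge: bisect on the position list computes exactly what A's inner scan finds
theorem bridge (n1 : List Char) (c : Char) (p : Nat) :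
    (match aFind n1 c p with
     | some j => PySem.List.bisectLeft (posL n1 c 0) (p : Int) < (posL n1 c 0).length ∧
         ∀ h : PySem.List.bisectLeft (posL n1 c 0) (p : Int) < (posL n1 c 0).length,
           (posL n1 c 0)[PySem.List.bisectLeft (posL n1 c 0) (p : Int)] = (j : Int)
     | none => (posL n1 c 0).length ≤ PySem.List.bisectLeft (posL n1 c 0) (p : Int)) := by
  have hs := posL_sorted n1 c 0
  obtain ⟨hle, hlt, hge2⟩ := PySem.List.bisectLeft_spec (posL n1 c 0) (p : Int) hs
  set ps := posL n1 c 0 with hps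
  set lo := PySem.List.bisectLeft ps (p : Int) with hlo
  cases haf : aFind n1 c p with
  | none =>
    by_contra hcon
    have hlolen : lo < ps.length := by omega
    have hmem : ps[lo] ∈ ps := List.getElem_mem hlolen
    rcases (mem_posL_zero n1 c _).1 hmem with ⟨j, hj, hc, hej⟩
    have hpj : (p : Int) ≤ (j : Int) := by rw [← hej]; exact hge2 lo hlolen (le_refl _)
    exact aFind_none n1 c p haf j (by exact_mod_cast hpj) hj hc
  | some j =>
    obtain ⟨hpj, hjlen, hjc, hjmin⟩ := aFind_some n1 c p j haf
    have hjm : (j : Int) ∈ ps := (mem_posL_zero n1 c _).2 ⟨j, hjlen, hjc, rfl⟩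
    obtain ⟨jj, hjj, hejj⟩ := List.getElem_of_mem hjm
    have hjjlo : ¬ jj < lo := by
      intro hcon
      have := hlt jj hjj hcon
      rw [hejj] at this
      omega
    have hlolen : lo < ps.length := by omega
    refine ⟨hlolen, fun _ => ?_⟩
    have h1 : (p : Int) ≤ ps[lo] := hge2 lo hlolen (le_refl _)
    have h2 : (j : Int) ≤ ps[lo] := by
      rcases (mem_posL_zero n1 c _).1 (List.getElem_mem hlolen) with ⟨j2, hj2, hc2, hej2⟩
      have : j ≤ j2 := hjmin j2 (by rw [hej2] at h1; exact_mod_cast h1) hj2 hc2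
      rw [hej2]; exact_mod_cast this
    have h3 : ps[lo] ≤ (j : Int) := by
      rcases Nat.eq_or_lt_of_le (by omega : lo ≤ jj) with heq | hlt2
      · subst heq; rw [hejj]
      · rw [← hejj]
        exact List.pairwise_iff_getElem.1 hs lo jj hlolen hjj hlt2
    omega

theorem get?_buildPos_some (n1 : List Char) (c : Char) (ps : List Int)
    (h : (buildPos n1).get? c = some ps) : ps = posL n1 c 0 := by
  have := getD_buildPos n1 c
  rw [PySem.Dict.getD_eq_get?_getD, h] at this
  simpa using this

theorem get?_buildPos_none (n1 : List Char) (c : Char)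
    (h : (buildPos n1).get? c = none) : posL n1 c 0 = [] := by
  have := getD_buildPos n1 c
  rw [PySem.Dict.getD_eq_get?_getD, h] at this
  simpa using this.symm

theorem scan_eq (n1 n2 : List Char) (i : Nat) (mc : Int) (sp2 sp1 : Nat) :
    aScan n1 n2 i mc sp2 sp1 = bCount (buildPos n1) (n2.drop i) (sp1 : Int) mc := by
  induction hd : n2.length - i generalizing i mc sp2 sp1 with
  | zero =>
    rw [List.drop_eq_nil_of_le (by omega)]
    unfold aScan
    rw [dif_neg (by omega)]
    rfl
  | succ m ih =>
    have hi : i < n2.length := by omega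
    rw [List.drop_eq_getElem_cons hi]
    unfold aScan
    rw [dif_pos hi]
    have hbr := bridge n1 n2[i] sp1
    show _ = bCount (buildPos n1) (n2[i] :: n2.drop (i+1)) (sp1 : Int) mc
    unfold bCount
    cases hg : (buildPos n1).get? n2[i] with
    | none =>
      have hemp := get?_buildPos_none n1 n2[i] hg
      cases haf : aFind n1 n2[i] sp1 with
      | some j =>
        obtain ⟨_, hjlen, hjc, _⟩ := aFind_some n1 n2[i] sp1 j haf
        have : (j : Int) ∈ posL n1 n2[i] 0 := (mem_posL_zero n1 n2[i] _).2 ⟨j, hjlen, hjc, rfl⟩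
        rw [hemp] at this
        simp at this
      | none =>
        exact ih (i+1) mc sp2 sp1 (by omega)
    | some ps =>
      obtain rfl := get?_buildPos_some n1 n2[i] ps hg
      cases haf : aFind n1 n2[i] sp1 with
      | some j =>
        rw [haf] at hbr
        obtain ⟨hlo, hval⟩ := hbr
        dsimp only
        rw [dif_pos hlo]
        rw [hval hlo]
        have : ((j : Int) + 1) = ((j + 1 : Nat) : Int) := by push_cast; ring
        rw [this]
        exact ih (i+1) (mc+1) (i+1) (j+1) (by omega)
      | none =>
        rw [haf] at hbr
        dsimp only
        rw [dif_neg (by omega)]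
        exact ih (i+1) mc sp2 sp1 (by omega)

-- ===== VERDICT (by name: the statement is the Claim_ definition above) =====
theorem getMostMatched_spec : Claim_equal_getMostMatched := by
  intro name1 length pickedFrom _
  unfold Spec_getMostMatched getMostMatched getMostMatched_alt
  have hfun : ∀ (st : String × Int) (name2 : String),
      (let matchCount := aScan name1.toList name2.toList 0 0 0 0
       if matchCount > st.2 then (name2, matchCount) else st)
      = (let count := bCount (buildPos name1.toList) name2.toList 0 0
         if count > st.2 then (name2, count) else st) := by
    intro st name2
    have := scan_eq name1.toList name2.toList 0 0 0 0
    simp at this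
    simp [this]
  simp only [hfun]
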